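-- pv_equiv track=rewrite | github.com/matthewyli/catalyst_matthew_trial | tvl_sync_growth.py | _normalize_lag_days
-- ===== SOURCE A (Python) =====
-- from typing import Any, Dict, List, Optional, Sequence, Tuple
--
-- def _normalize_lag_days(lag_days: Optional[Sequence[int]]) -> List[int]:
--     if lag_days is None or len(lag_days) == 0:
--         return [0]
--     seen = set()
--     ordered: List[int] = []
--     for item in lag_days:
--         lag = int(item)
--         if lag not in seen:
--             seen.add(lag)
--             ordered.append(lag)
--     if 0 not in seen:
--         ordered.insert(0, 0)
--     else:
--         zero_idx = ordered.index(0)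
--         if zero_idx != 0:
--             ordered.insert(0, ordered.pop(zero_idx))
--     return ordered
-- ===== SOURCE B (Python) =====
-- from typing import List, Optional, Sequence
--
--
-- def _normalize_lag_days(lag_days: Optional[Sequence[int]]) -> List[int]:
--     if lag_days is None or len(lag_days) == 0:
--         return [0]
--     out = [0]
--     rest = [int(x) for x in lag_days]
--     while rest:
--         head = rest[0]
--         rest = [x for x in rest[1:] if x != head]
--         if head != 0:
--             out.append(head)
--     return out
-- ===== Notes on version B (the rewrite author's own statement) =====
-- stated objective: alternative
-- what changed: Replaces A's seen-set dedup pass plus index/pop/insert surgery on the 0 element by a filter-nub: repeatedly take the head and filter all its occurrences out of the remaining list (no auxiliary set or dict), emitting non-zero heads after an initial 0.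
import Mathlib
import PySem

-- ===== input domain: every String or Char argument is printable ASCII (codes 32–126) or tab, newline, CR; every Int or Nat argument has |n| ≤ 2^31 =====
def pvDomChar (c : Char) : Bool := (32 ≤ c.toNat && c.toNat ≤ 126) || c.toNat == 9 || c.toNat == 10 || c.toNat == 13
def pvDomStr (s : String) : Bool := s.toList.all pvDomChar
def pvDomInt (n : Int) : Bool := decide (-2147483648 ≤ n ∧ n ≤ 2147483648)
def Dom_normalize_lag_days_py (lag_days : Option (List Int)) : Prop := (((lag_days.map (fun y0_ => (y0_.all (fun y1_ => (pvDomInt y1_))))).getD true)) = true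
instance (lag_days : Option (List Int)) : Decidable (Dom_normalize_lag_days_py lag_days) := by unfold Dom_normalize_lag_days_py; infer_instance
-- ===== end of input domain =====

-- B replaces A's seen-set dedup and index/pop/insert surgery on 0 by a filter-nub:
-- repeatedly take the head, filter its occurrences out of the rest, emit non-zero heads
-- after an initial 0 (objective: alternative decomposition, no auxiliary set).

-- ===== PORT A =====
-- the dedup loop of A: one pass keeping (seen, ordered)
def pvALoop (xs : List Int) (st : PySem.Set Int × List Int) : PySem.Set Int × List Int :=
  xs.foldl (fun st item =>
    let lag := item
    if !(PySem.Set.contains st.1 lag) then (PySem.Set.add st.1 lag, st.2 ++ [lag]) else st) st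

def normalize_lag_days_py (lag_days : Option (List Int)) : List Int :=
  match lag_days with
  | none => [0]
  | some xs =>
    if xs.length = 0 then [0]
    else
      let st := pvALoop xs (PySem.Set.empty, [])
      let seen := st.1
      let ordered := st.2
      if !(PySem.Set.contains seen 0) then PySem.List.insert ordered 0 0
      else
        match PySem.List.index? ordered 0 with
        | none => ordered    -- unreachable: 0 ∈ seen = ordered
        | some zero_idx =>
          if (zero_idx : Int) ≠ 0 then
            match PySem.List.pop? ordered (zero_idx : Int) with
            | none => ordered    -- unreachable: zero_idx is a valid index
            | some (v, rest) => PySem.List.insert rest 0 v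
          else ordered

-- ===== PORT B =====
-- B's while loop: head := rest[0]; rest := non-head tail; append head if non-zero
def pvNub : List Int → List Int
  | [] => []
  | head :: rest =>
    (if head != 0 then [head] else []) ++ pvNub (rest.filter (fun x => x != head))
termination_by xs => xs.length
decreasing_by
  simpa using Nat.lt_succ_of_le (List.length_filter_le _ _)

def normalize_lag_days_py_alt (lag_days : Option (List Int)) : List Int :=
  match lag_days with
  | none => [0]
  | some xs =>
    if xs.length = 0 then [0]
    else 0 :: pvNub xs

-- ===== PRECONDITION & SPEC =====
def Spec_normalize_lag_days_py (lag_days : Option (List Int)) (out : List Int) : Prop := out = normalize_lag_days_py_alt lag_days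
instance (lag_days : Option (List Int)) (out : List Int) : Decidable (Spec_normalize_lag_days_py lag_days out) := by unfold Spec_normalize_lag_days_py; infer_instance

-- ===== CLAIM (what is proved, stated in full; the proofs are below) =====
def Claim_equal_normalize_lag_days_py : Prop := ∀ (lag_days : Option (List Int)), Dom_normalize_lag_days_py lag_days → Spec_normalize_lag_days_py lag_days (normalize_lag_days_py lag_days)

-- ===== LEMMAS AND PROOFS =====

theorem pv_insert_zero (xs : List Int) (v : Int) : PySem.List.insert xs 0 v = v :: xs := by
  simp [PySem.List.insert, PySem.List.sliceIndices]

theorem pvALoop_eq (xs : List Int) (s : List Int) :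
    pvALoop xs (s, s) = (xs.foldl PySem.Set.add s, xs.foldl PySem.Set.add s) := by
  induction xs generalizing s with
  | nil => rfl
  | cons x xs ih =>
    have hstep : pvALoop (x :: xs) (s, s) = pvALoop xs (PySem.Set.add s x, PySem.Set.add s x) := by
      by_cases h : PySem.Set.contains s x <;>
        simp [pvALoop, PySem.Set.add, PySem.Set.contains] at h ⊢ <;> simp [h]
    rw [hstep, ih]
    rfl

-- folding Set.add ignores elements already forced into the accumulator
theorem pv_foldl_add_filter (xs : List Int) (s : List Int) (x : Int) (hx : x ∈ s) :
    xs.foldl PySem.Set.add s = (xs.filter (fun y => y != x)).foldl PySem.Set.add s := by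
  induction xs generalizing s with
  | nil => rfl
  | cons y ys ih =>
    by_cases h : y = x
    · subst h
      have : PySem.Set.add s y = s := by
        simp [PySem.Set.add, PySem.Set.contains, hx]
      simp only [List.filter_cons, bne_self_eq_false, List.foldl_cons, this]
      exact ih s hx
    · have hb : (y != x) = true := by simp [h]
      simp only [List.filter_cons, hb, List.foldl_cons]
      exact ih (PySem.Set.add s y) (by simp [PySem.Set.add, PySem.Set.contains]; split <;> simp [hx])

-- PySem ordered dedup satisfies the filter-nub recurrence
theorem pv_dedup_cons (x : Int) (xs : List Int) :
    PySem.List.dedup (x :: xs) = x :: PySem.List.dedup (xs.filter (fun y => y != x)) := by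
  have h1 : PySem.List.dedup (x :: xs) = (x :: xs).foldl PySem.Set.add [] := by
    rw [PySem.List.dedup_eq_ofList, PySem.Set.ofList_eq_foldl]
  have h2 : PySem.List.dedup (xs.filter (fun y => y != x)) = (xs.filter (fun y => y != x)).foldl PySem.Set.add [] := by
    rw [PySem.List.dedup_eq_ofList, PySem.Set.ofList_eq_foldl]
  rw [h1, h2]
  have hadd : PySem.Set.add ([] : List Int) x = [x] := by
    simp [PySem.Set.add, PySem.Set.contains]
  rw [List.foldl_cons, hadd, pv_foldl_add_filter xs [x] x (by simp)]
  -- fold from [x] over a list avoiding x = x :: fold from []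
  have main : ∀ (ys : List Int), (∀ y ∈ ys, y ≠ x) →
      ∀ (t : List Int), x ∉ t →
      ys.foldl PySem.Set.add (x :: t) = x :: ys.foldl PySem.Set.add t := by
    intro ys
    induction ys with
    | nil => intro _ t _; rfl
    | cons y ys ih =>
      intro hy t ht
      have hyx : y ≠ x := hy y (by simp)
      have hstep1 : PySem.Set.add (x :: t) y = x :: PySem.Set.add t y := by
        simp [PySem.Set.add, PySem.Set.contains, hyx]
        split <;> simp
      rw [List.foldl_cons, List.foldl_cons, hstep1]
      exact ih (fun z hz => hy z (by simp [hz])) (PySem.Set.add t y)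
        (by simp [PySem.Set.add, PySem.Set.contains]; split <;> simp [Ne.symm hyx, ht])
  exact main _ (fun y hy => by
      have := List.of_mem_filter hy
      simpa using this) [] (by simp)

-- B's filter-nub computes exactly the non-zero part of the ordered dedup
theorem pvNub_eq_aux (n : Nat) : ∀ (xs : List Int), xs.length ≤ n →
    pvNub xs = (PySem.List.dedup xs).filter (fun v => v != 0) := by
  induction n with
  | zero =>
    intro xs hlen
    have : xs = [] := List.eq_nil_of_length_eq_zero (Nat.le_zero.mp hlen)
    subst this
    simp [pvNub, PySem.List.dedup, PySem.Set.ofList]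
  | succ n ih =>
    intro xs hlen
    match xs with
    | [] => simp [pvNub, PySem.List.dedup, PySem.Set.ofList]
    | head :: rest =>
      have hr : (rest.filter (fun x => x != head)).length ≤ n :=
        le_trans (List.length_filter_le _ _) (Nat.le_of_succ_le_succ hlen)
      rw [pvNub, ih _ hr, pv_dedup_cons]
      by_cases h : head = 0 <;> simp [h]

theorem pvNub_eq (xs : List Int) : pvNub xs = (PySem.List.dedup xs).filter (fun v => v != 0) :=
  pvNub_eq_aux xs.length xs (le_refl _)

-- A's post-processing of the deduped (hence nodup) list equals 0 :: non-zero dedup.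
theorem pvPost_eq (d : List Int) (hd : d.Nodup) :
    (if !(PySem.Set.contains d 0) then PySem.List.insert d 0 0
     else
       match PySem.List.index? d 0 with
       | none => d
       | some zero_idx =>
         if (zero_idx : Int) ≠ 0 then
           match PySem.List.pop? d (zero_idx : Int) with
           | none => d
           | some (v, rest) => PySem.List.insert rest 0 v
         else d)
    = 0 :: d.filter (fun x => x != 0) := by
  by_cases h0 : (0 : Int) ∈ d
  · rw [if_neg (by simp [PySem.Set.contains]; exact h0)]
    obtain ⟨k, hidx⟩ := Option.isSome_iff_exists.mp
      ((PySem.List.index?_isSome_iff d 0).mpr h0)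
    obtain ⟨pre, suf, hsplit, hlen, hpre⟩ := (PySem.List.index?_eq_some_iff d 0 k).mp hidx
    subst hsplit
    have hsuf : (0 : Int) ∉ suf := by
      simp [List.nodup_append] at hd
      tauto
    have hfilter : (pre ++ 0 :: suf).filter (fun x => x != 0) = pre ++ suf := by
      rw [List.filter_append]
      congr 1
      · exact List.filter_eq_self.mpr (fun a ha => by
          simp only [bne_iff_ne, ne_eq]
          exact fun h => hpre (h ▸ ha))
      · simp only [List.filter_cons, bne_self_eq_false]
        exact List.filter_eq_self.mpr (fun a ha => by
          simp only [bne_iff_ne, ne_eq]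
          exact fun h => hsuf (h ▸ ha))
    simp only [hidx, hfilter]
    by_cases hz : k = 0
    · subst hz
      have hpre0 : pre = [] := List.eq_nil_of_length_eq_zero hlen
      subst hpre0
      simp
    · have hzi : ((k : Int)) ≠ 0 := by exact_mod_cast hz
      rw [if_pos hzi]
      have hklt : k < (pre ++ 0 :: suf).length := by
        simp [← hlen]
      rw [PySem.List.pop?_natCast _ _ hklt]
      have hget : (pre ++ 0 :: suf)[k]'hklt = 0 := by
        subst hlen
        simp
      have herase : (pre ++ 0 :: suf).eraseIdx k = pre ++ suf := by
        rw [← hlen, List.eraseIdx_append_of_length_le (le_refl _)]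
        simp
      simp only [hget, herase, pv_insert_zero]
  · rw [if_pos (by simp [PySem.Set.contains]; exact h0), pv_insert_zero]
    have : d.filter (fun x => x != 0) = d :=
      List.filter_eq_self.mpr (fun a ha => by
        simp only [bne_iff_ne, ne_eq]
        exact fun h => h0 (h ▸ ha))
    rw [this]

-- ===== VERDICT (by name: the statement is the Claim_ definition above) =====
theorem normalize_lag_days_py_spec : Claim_equal_normalize_lag_days_py := by
  intro lag_days _
  unfold Spec_normalize_lag_days_py normalize_lag_days_py normalize_lag_days_py_alt
  match lag_days with
  | none => rfl
  | some xs =>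
    by_cases hx : xs.length = 0
    · simp [hx]
    · simp only [hx, if_false]
      have hloop : pvALoop xs (PySem.Set.empty, []) = (PySem.List.dedup xs, PySem.List.dedup xs) := by
        rw [show (PySem.Set.empty : PySem.Set Int) = ([] : List Int) from rfl]
        rw [pvALoop_eq, PySem.List.dedup_eq_ofList, PySem.Set.ofList_eq_foldl]
      rw [hloop, pvNub_eq]
      exact pvPost_eq (PySem.List.dedup xs) (PySem.List.nodup_dedup xs)
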